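-- pv_equiv track=rewrite | github.com/FedericoBaldi/LeetCode-solutions | Python solutions/318 maximum product of word lengths.py | maxProduct
-- ===== SOURCE A (Python) =====
-- from typing import List
--
-- def maxProduct(words: List[str]) -> int:
--     count = []
--     for w in words:
--         count.append(set(w))
--     best = 0
--     for i in range(len(count)):
--         for j in range(i + 1, len(count)):
--             if not count[i] & count[j]:
--                 best = max(best, len(words[i]) * len(words[j]))
--     return best
-- ===== SOURCE B (Python) =====
-- def maxProduct(words):
--     # collapse words into a table: canonical sorted letter-set -> max length of any word with that letter-set
--     best_len = {}
--     for w in words: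
--         k = ''.join(sorted(set(w)))
--         if len(w) > best_len.get(k, 0):
--             best_len[k] = len(w)
--     items = list(best_len.items())
--     best = 0
--     for i, (ki, li) in enumerate(items):
--         for kj, lj in items[i + 1:]:
--             if not (set(ki) & set(kj)):
--                 best = max(best, li * lj)
--     return best
-- ===== Notes on version B (the rewrite author's own statement) =====
-- stated objective: faster
-- what changed: B collapses the word list into a dict mapping each canonical sorted letter-set to the maximum length of any word with that letter-set, then runs the pairwise disjointness scan over the distinct table entries (enumerate + slice) instead of index loops over all raw words.
import Mathlib
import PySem

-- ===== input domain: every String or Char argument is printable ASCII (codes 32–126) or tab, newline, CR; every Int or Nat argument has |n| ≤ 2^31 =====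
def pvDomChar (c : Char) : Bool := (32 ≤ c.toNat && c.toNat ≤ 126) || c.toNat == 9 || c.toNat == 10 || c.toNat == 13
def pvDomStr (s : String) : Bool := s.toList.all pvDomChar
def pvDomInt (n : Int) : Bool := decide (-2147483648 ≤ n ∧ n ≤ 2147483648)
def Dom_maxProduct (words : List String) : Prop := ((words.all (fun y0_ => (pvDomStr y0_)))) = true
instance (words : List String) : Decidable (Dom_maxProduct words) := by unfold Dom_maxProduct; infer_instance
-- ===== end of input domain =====

-- B replaces A's all-pairs scan over the raw word list by a table mapping each canonical
-- sorted letter-set to the max length of any word with that letter-set, then scans pairs of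
-- the distinct table entries, so the quadratic scan runs over distinct letter-sets only (measured faster on the generated inputs).

-- ===== PORT A =====
def pvCharset (w : String) : PySem.Set Char := PySem.Set.ofList w.toList

def maxProduct (words : List String) : Int :=
  let count := words.foldl (fun acc w => acc ++ [pvCharset w]) ([] : List (PySem.Set Char))
  (PySem.List.pyRange 0 (count.length : Int) 1).foldl (fun best i =>
    (PySem.List.pyRange (i + 1) (count.length : Int) 1).foldl (fun best j =>
      if PySem.Set.inter (PySem.List.pyGetD count i PySem.Set.empty)
           (PySem.List.pyGetD count j PySem.Set.empty) = [] then
        max best (PySem.Str.len (PySem.List.pyGetD words i "") *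
                  PySem.Str.len (PySem.List.pyGetD words j ""))
      else best) best) 0

-- ===== PORT B =====
-- ''.join(sorted(set(w)))
def keyOf (w : String) : String :=
  String.ofList (PySem.List.sorted (PySem.Set.ofList w.toList) (fun c => c) false)

def maxProduct_alt (words : List String) : Int :=
  let bestLen : PySem.Dict String Int := words.foldl (fun d w =>
      if PySem.Str.len w > d.getD (keyOf w) 0 then d.insert (keyOf w) (PySem.Str.len w) else d)
    PySem.Dict.empty
  let items := bestLen.items
  (PySem.List.enumerate items 0).foldl (fun best p =>
    (PySem.List.slice items (some (p.1 + 1)) none).foldl (fun best q =>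
      if PySem.Set.inter (PySem.Set.ofList p.2.1.toList) (PySem.Set.ofList q.1.toList) = [] then
        max best (p.2.2 * q.2)
      else best) best) 0

-- ===== PRECONDITION & SPEC =====
def Spec_maxProduct (words : List String) (out : Int) : Prop := out = maxProduct_alt words
instance (words : List String) (out : Int) : Decidable (Spec_maxProduct words out) := by unfold Spec_maxProduct; infer_instance

-- ===== CLAIM (what is proved, stated in full; the proofs are below) =====
def Claim_equal_maxProduct : Prop := ∀ (words : List String), Dom_maxProduct words → Spec_maxProduct words (maxProduct words)

-- ===== LEMMAS AND PROOFS =====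

-- The common pairwise-loop shape: visit every ordered pair (earlier, later) of the list.
def pvPairsFold {α : Type} (G : Int → α → α → Int) (a : Int) : List α → Int
  | [] => a
  | x :: xs => pvPairsFold G (xs.foldl (fun b y => G b x y) a) xs

def pvPairs {α : Type} : List α → List (α × α)
  | [] => []
  | x :: xs => xs.map (fun y => (x, y)) ++ pvPairs xs

def pvGA (b : Int) (w1 w2 : String) : Int :=
  if PySem.Set.inter (pvCharset w1) (pvCharset w2) = [] then
    max b (PySem.Str.len w1 * PySem.Str.len w2) else b

def pvGB (b : Int) (p q : String × Int) : Int :=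
  if PySem.Set.inter (PySem.Set.ofList p.1.toList) (PySem.Set.ofList q.1.toList) = [] then
    max b (p.2 * q.2) else b

def pvStep (d : PySem.Dict String Int) (w : String) : PySem.Dict String Int :=
  if PySem.Str.len w > d.getD (keyOf w) 0 then d.insert (keyOf w) (PySem.Str.len w) else d

lemma mem_pvPairs {α : Type} {l : List α} {x y : α} :
    (x, y) ∈ pvPairs l ↔ [x, y].Sublist l := by
  induction l with
  | nil => simp [pvPairs]
  | cons a t ih =>
    simp only [pvPairs, List.mem_append, List.mem_map, ih]
    constructor
    · rintro (⟨b, hb, h⟩ | h)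
      · cases h
        exact (List.cons_sublist_cons).mpr (List.singleton_sublist.mpr hb)
      · exact h.cons a
    · intro h
      rcases List.sublist_cons_iff.mp h with h | ⟨r, hr, hsub⟩
      · exact Or.inr h
      · cases hr
        exact Or.inl ⟨y, List.singleton_sublist.mp hsub, rfl⟩

lemma pvSublist_pair_of_ne {α : Type} {l : List α} {x y : α}
    (hx : x ∈ l) (hy : y ∈ l) (hne : x ≠ y) :
    [x, y].Sublist l ∨ [y, x].Sublist l := by
  induction l with
  | nil => cases hx
  | cons a t ih =>
    rcases List.mem_cons.mp hx with rfl | hx'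
    · rcases List.mem_cons.mp hy with rfl | hy'
      · exact absurd rfl hne
      · exact Or.inl ((List.cons_sublist_cons).mpr (List.singleton_sublist.mpr hy'))
    · rcases List.mem_cons.mp hy with rfl | hy'
      · exact Or.inr ((List.cons_sublist_cons).mpr (List.singleton_sublist.mpr hx'))
      · exact (ih hx' hy').imp (·.cons a) (·.cons a)

lemma pvPairsFold_eq_max {α : Type} (P : α → α → Prop) [∀ x y, Decidable (P x y)]
    (f : α → α → Int) (l : List α) (a : Int) :
    pvPairsFold (fun b x y => if P x y then max b (f x y) else b) a l
      = (((pvPairs l).filter (fun p => decide (P p.1 p.2))).map (fun p => f p.1 p.2)).foldl max a := by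
  induction l generalizing a with
  | nil => simp [pvPairsFold, pvPairs]
  | cons x xs ih =>
    rw [pvPairsFold, ih]
    have hinner : xs.foldl (fun b y => if P x y then max b (f x y) else b) a
        = ((xs.filter (fun y => decide (P x y))).map (fun y => f x y)).foldl max a := by
      rw [PySem.List.foldl_ite_eq_foldl_filter (p := fun y => P x y), List.foldl_map]
    rw [hinner]
    simp only [pvPairs, List.filter_append, List.map_append, List.foldl_append]
    congr 1
    simp only [List.filter_map, List.map_map, Function.comp_def]

lemma pvFoldl_max_le {L1 L2 : List Int} (h : ∀ p ∈ L1, p ≤ L2.foldl max 0) :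
    L1.foldl max 0 ≤ L2.foldl max 0 := by
  rcases PySem.List.foldl_max_mem L1 0 with h0 | hm
  · rw [h0]; exact (PySem.List.le_foldl_max L2 0).1
  · exact h _ hm

-- index-loop over drops = pvPairsFold
lemma pvOuterIndex {α : Type} (G : Int → α → α → Int) (d : α) (full : List α) :
    ∀ (l : List α) (s : Int) (a : Int), 0 ≤ s → full.drop s.toNat = l →
    (PySem.List.pyRange s (full.length : Int) 1).foldl (fun b i =>
        (full.drop (i + 1).toNat).foldl (fun b' y => G b' (PySem.List.pyGetD full i d) y) b) a
      = pvPairsFold G a l := by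
  intro l
  induction l with
  | nil =>
    intro s a hs hdrop
    have hlen : full.length ≤ s.toNat := List.drop_eq_nil_iff.mp hdrop
    have : PySem.List.pyRange s (full.length : Int) 1 = [] := by
      simp only [PySem.List.pyRange, one_ne_zero, ↓reduceIte, one_mul, zero_lt_one,
        add_sub_cancel_right, EuclideanDomain.div_one, List.map_eq_nil_iff, List.range_eq_nil,
        ite_eq_right_iff, Int.toNat_eq_zero, tsub_le_iff_right, zero_add]
      intro; omega
    rw [this]
    rfl
  | cons x xs ih =>
    intro s a hs hdrop
    have hslt : s.toNat < full.length := by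
      by_contra hge
      rw [List.drop_eq_nil_iff.mpr (Nat.le_of_not_lt hge)] at hdrop
      cases hdrop
    have hs' : s < (full.length : Int) := by omega
    rw [PySem.List.pyRange_one_cons hs', List.foldl_cons]
    have hx : PySem.List.pyGetD full s d = x := by
      rw [PySem.List.pyGetD_of_nonneg full d hs]
      have h0 : (full.drop s.toNat)[0]? = some x := by rw [hdrop]; rfl
      rw [List.getElem?_drop] at h0
      rw [Nat.add_zero] at h0
      rw [List.getD_eq_getElem?_getD, h0]
      rfl
    have hdrop' : full.drop (s + 1).toNat = xs := by
      have : (s + 1).toNat = s.toNat + 1 := by omega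
      rw [this, ← List.drop_drop, hdrop]
      rfl
    rw [hx, hdrop']
    rw [pvPairsFold]
    exact ih (s + 1) _ (by omega) hdrop'

-- enumerate-loop over drops = pvPairsFold
lemma pvOuterEnum {α : Type} (G : Int → α → α → Int) (full : List α) :
    ∀ (l : List α) (s : Int) (a : Int), 0 ≤ s → full.drop s.toNat = l →
    (PySem.List.enumerate l s).foldl (fun b p =>
        (full.drop (p.1 + 1).toNat).foldl (fun b' y => G b' p.2 y) b) a
      = pvPairsFold G a l := by
  intro l
  induction l with
  | nil => intro s a _ _; rfl
  | cons x xs ih =>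
    intro s a hs hdrop
    rw [PySem.List.enumerate_cons, List.foldl_cons]
    have hdrop' : full.drop (s + 1).toNat = xs := by
      have : (s + 1).toNat = s.toNat + 1 := by omega
      rw [this, ← List.drop_drop, hdrop]
      rfl
    rw [hdrop', pvPairsFold]
    exact ih (s + 1) _ (by omega) hdrop'

lemma pvA_eq (words : List String) : maxProduct words = pvPairsFold pvGA 0 words := by
  unfold maxProduct
  simp only [PySem.List.foldl_append_singleton_eq_map, List.nil_append, List.length_map]
  rw [PySem.List.foldl_congr_mem _ _
      (g := fun b i => (words.drop (i + 1).toNat).foldl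
        (fun b' y => pvGA b' (PySem.List.pyGetD words i "") y) b) _ ?_]
  · exact pvOuterIndex pvGA "" words words 0 0 le_rfl rfl
  · intro b i hi
    obtain ⟨hi0, _⟩ := PySem.List.mem_pyRange_one.mp hi
    have hempty : (PySem.Set.empty : PySem.Set Char) = pvCharset "" := rfl
    simp only [hempty, PySem.List.pyGetD_map]
    exact PySem.List.foldl_pyRange_pyGetD' words ""
      (fun b' y => pvGA b' (PySem.List.pyGetD words i "") y) b (by omega)

lemma pvB_eq (words : List String) :
    maxProduct_alt words = pvPairsFold pvGB 0 (words.foldl pvStep PySem.Dict.empty).items := by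
  unfold maxProduct_alt
  show (PySem.List.enumerate (words.foldl pvStep PySem.Dict.empty).items 0).foldl _ 0 = _
  rw [PySem.List.foldl_congr_mem _ _
      (g := fun b p => ((words.foldl pvStep PySem.Dict.empty).items.drop (p.1 + 1).toNat).foldl
        (fun b' q => pvGB b' p.2 q) b) _ ?_]
  · exact pvOuterEnum pvGB _ _ 0 0 le_rfl rfl
  · intro b p hp
    obtain ⟨k, _, rfl⟩ := (PySem.List.mem_enumerate_iff _ _ _).mp hp
    rw [PySem.List.slice_from _ (by omega)]
    rfl

-- basic facts
lemma pvLen_nonneg (w : String) : 0 ≤ PySem.Str.len w := by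
  rw [PySem.Str.len_eq]; positivity

lemma pvMem_keyOf (w : String) (c : Char) : c ∈ (keyOf w).toList ↔ c ∈ w.toList := by
  unfold keyOf
  rw [String.toList_ofList, (PySem.List.sorted_perm _ _ _).mem_iff, PySem.Set.mem_ofList]

lemma pvInter_eq_nil_iff (s t : PySem.Set Char) :
    PySem.Set.inter s t = [] ↔ ∀ c ∈ s, c ∉ t := by
  rw [List.eq_nil_iff_forall_not_mem]
  constructor
  · intro h c hcs hct
    exact h c ((PySem.Set.mem_inter s t c).mpr ⟨hcs, hct⟩)
  · intro h c hc
    obtain ⟨h1, h2⟩ := (PySem.Set.mem_inter s t c).mp hc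
    exact h c h1 h2

-- dictionary-building invariant
lemma pvDictInv (ws : List String) : ∀ d : PySem.Dict String Int, d.keys.Nodup →
    ((ws.foldl pvStep d).keys.Nodup
    ∧ (∀ p ∈ (ws.foldl pvStep d).items, p ∈ d.items ∨ ∃ w ∈ ws, keyOf w = p.1 ∧ PySem.Str.len w = p.2)
    ∧ (∀ k, d.getD k 0 ≤ (ws.foldl pvStep d).getD k 0)
    ∧ (∀ w ∈ ws, PySem.Str.len w ≤ (ws.foldl pvStep d).getD (keyOf w) 0)) := by
  induction ws with
  | nil => intro d hnd; exact ⟨hnd, fun p hp => Or.inl hp, fun k => le_rfl, by simp⟩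
  | cons w t ih =>
    intro d hnd
    have hstep : (pvStep d w).keys.Nodup := by
      unfold pvStep
      split_ifs
      · exact PySem.Dict.nodup_keys_insert _ _ _ hnd
      · exact hnd
    obtain ⟨h1, h2, h3, h4⟩ := ih (pvStep d w) hstep
    have hw : PySem.Str.len w ≤ (pvStep d w).getD (keyOf w) 0 := by
      unfold pvStep
      split_ifs with hc
      · rw [PySem.Dict.getD_insert_self]
      · omega
    refine ⟨h1, ?_, ?_, ?_⟩
    · intro p hp
      rcases h2 p hp with hp' | ⟨w', hw', hk⟩
      · unfold pvStep at hp'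
        split_ifs at hp' with hc
        · rcases (PySem.Dict.mem_items_insert _ _ _ _).mp hp' with rfl | ⟨hm, _⟩
          · exact Or.inr ⟨w, List.mem_cons_self .., rfl, rfl⟩
          · exact Or.inl hm
        · exact Or.inl hp'
      · exact Or.inr ⟨w', List.mem_cons_of_mem w hw', hk⟩
    · intro k
      refine le_trans ?_ (h3 k)
      unfold pvStep
      split_ifs with hc
      · rw [PySem.Dict.getD_insert]
        split_ifs with hk
        · rw [hk] at *; omega
        · exact le_rfl
      · exact le_rfl
    · intro w' hw'
      rcases List.mem_cons.mp hw' with rfl | hw''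
      · exact le_trans hw (h3 _)
      · exact h4 w' hw''

lemma pvEntry (d : PySem.Dict String Int) (k : String) (h : 0 < d.getD k 0) :
    (k, d.getD k 0) ∈ d.items := by
  rcases hg : d.get? k with _ | v
  · rw [PySem.Dict.getD_eq_get?_getD, hg] at h
    simp at h
  · rw [PySem.Dict.getD_eq_get?_getD, hg]
    exact PySem.Dict.mem_items_of_get?_eq_some d hg

-- symmetry / transfer helpers
lemma pvInter_symm {s t : PySem.Set Char} (h : PySem.Set.inter s t = []) :
    PySem.Set.inter t s = [] := by
  rw [pvInter_eq_nil_iff] at h ⊢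
  intro c hct hcs
  exact h c hcs hct

lemma pvMem_keySet (w : String) (c : Char) :
    c ∈ PySem.Set.ofList (keyOf w).toList ↔ c ∈ pvCharset w := by
  unfold pvCharset
  rw [PySem.Set.mem_ofList, PySem.Set.mem_ofList, pvMem_keyOf]

lemma pvKeyDisj (w1 w2 : String) :
    PySem.Set.inter (PySem.Set.ofList (keyOf w1).toList) (PySem.Set.ofList (keyOf w2).toList) = []
      ↔ PySem.Set.inter (pvCharset w1) (pvCharset w2) = [] := by
  rw [pvInter_eq_nil_iff, pvInter_eq_nil_iff]
  constructor
  · intro h c hc1 hc2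
    exact h c ((pvMem_keySet w1 c).mpr hc1) ((pvMem_keySet w2 c).mpr hc2)
  · intro h c hc1 hc2
    exact h c ((pvMem_keySet w1 c).mp hc1) ((pvMem_keySet w2 c).mp hc2)

-- the central equality
lemma pvCore (words : List String) :
    pvPairsFold pvGA 0 words = pvPairsFold pvGB 0 (words.foldl pvStep PySem.Dict.empty).items := by
  obtain ⟨hnd, hsrc, hmono, hcov⟩ :=
    pvDictInv words PySem.Dict.empty (PySem.Dict.nodup_keys_empty)
  set D := words.foldl pvStep PySem.Dict.empty with hD
  have hsrc' : ∀ p ∈ D.items, ∃ w ∈ words, keyOf w = p.1 ∧ PySem.Str.len w = p.2 := by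
    intro p hp
    rcases hsrc p hp with h | h
    · exact absurd h (by simp [PySem.Dict.empty])
    · exact h
  have hA' : pvPairsFold pvGA 0 words = _ :=
    pvPairsFold_eq_max (fun x y => PySem.Set.inter (pvCharset x) (pvCharset y) = [])
      (fun x y => PySem.Str.len x * PySem.Str.len y) words 0
  have hB' : pvPairsFold pvGB 0 D.items = _ :=
    pvPairsFold_eq_max
      (fun p q : String × Int =>
        PySem.Set.inter (PySem.Set.ofList p.1.toList) (PySem.Set.ofList q.1.toList) = [])
      (fun p q : String × Int => p.2 * q.2) D.items 0
  rw [hA', hB']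
  apply le_antisymm
  · apply pvFoldl_max_le
    intro v hv
    simp only [List.mem_map, List.mem_filter, decide_eq_true_eq] at hv
    obtain ⟨⟨x, y⟩, ⟨hmem, hdisj⟩, rfl⟩ := hv
    rcases eq_or_lt_of_le (pvLen_nonneg x) with h1 | h1
    · rw [← h1, zero_mul]
      exact (PySem.List.le_foldl_max _ 0).1
    rcases eq_or_lt_of_le (pvLen_nonneg y) with h2 | h2
    · rw [← h2, mul_zero]
      exact (PySem.List.le_foldl_max _ 0).1
    have hxy : [x, y] ⊆ words := (mem_pvPairs.mp hmem).subset
    have hxw : x ∈ words := hxy (by simp)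
    have hyw : y ∈ words := hxy (by simp)
    have hkx := hcov x hxw
    have hky := hcov y hyw
    have hmx : 0 < D.getD (keyOf x) 0 := lt_of_lt_of_le h1 hkx
    have hmy : 0 < D.getD (keyOf y) 0 := lt_of_lt_of_le h2 hky
    have hex : (keyOf x, D.getD (keyOf x) 0) ∈ D.items := pvEntry D _ hmx
    have hey : (keyOf y, D.getD (keyOf y) 0) ∈ D.items := pvEntry D _ hmy
    have hkne : keyOf x ≠ keyOf y := by
      intro heq
      have hxne : x.toList ≠ [] := by
        intro hnil
        rw [PySem.Str.len_eq, hnil] at h1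
        simp at h1
      obtain ⟨c, hc⟩ := List.exists_mem_of_ne_nil _ hxne
      have hc1 : c ∈ pvCharset x := (PySem.Set.mem_ofList _ _).mpr hc
      have hc2 : c ∈ pvCharset y := by
        have hk := (pvMem_keyOf x c).mpr hc
        rw [heq] at hk
        exact (PySem.Set.mem_ofList _ _).mpr ((pvMem_keyOf y c).mp hk)
      exact ((pvInter_eq_nil_iff _ _).mp hdisj c hc1) hc2
    have hene : (keyOf x, D.getD (keyOf x) 0) ≠ (keyOf y, D.getD (keyOf y) 0) := by
      intro h
      exact hkne (congrArg Prod.fst h)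
    have hdisjK := (pvKeyDisj x y).mpr hdisj
    have hprod : PySem.Str.len x * PySem.Str.len y
        ≤ D.getD (keyOf x) 0 * D.getD (keyOf y) 0 :=
      mul_le_mul hkx hky (le_of_lt h2) (le_of_lt hmx)
    refine le_trans hprod ?_
    rcases pvSublist_pair_of_ne hex hey hene with hs | hs
    · refine (PySem.List.le_foldl_max _ 0).2 _ ?_
      simp only [List.mem_map, List.mem_filter, decide_eq_true_eq]
      exact ⟨((keyOf x, D.getD (keyOf x) 0), (keyOf y, D.getD (keyOf y) 0)),
        ⟨mem_pvPairs.mpr hs, hdisjK⟩, rfl⟩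
    · rw [mul_comm]
      refine (PySem.List.le_foldl_max _ 0).2 _ ?_
      simp only [List.mem_map, List.mem_filter, decide_eq_true_eq]
      exact ⟨((keyOf y, D.getD (keyOf y) 0), (keyOf x, D.getD (keyOf x) 0)),
        ⟨mem_pvPairs.mpr hs, pvInter_symm hdisjK⟩, rfl⟩
  · apply pvFoldl_max_le
    intro v hv
    simp only [List.mem_map, List.mem_filter, decide_eq_true_eq] at hv
    obtain ⟨⟨e1, e2⟩, ⟨hmem, hdisjK⟩, rfl⟩ := hv
    have hsub : [e1, e2].Sublist D.items := mem_pvPairs.mp hmem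
    obtain ⟨w1, hw1, hk1, hl1⟩ := hsrc' e1 (hsub.subset (by simp))
    obtain ⟨w2, hw2, hk2, hl2⟩ := hsrc' e2 (hsub.subset (by simp))
    have hsubk : [e1.1, e2.1].Sublist D.keys := hsub.map Prod.fst
    have hne1 : e1.1 ≠ e2.1 := by
      have := hnd.sublist hsubk
      simpa using this
    have hwne : w1 ≠ w2 := by
      intro h
      rw [← hk1, ← hk2] at hne1
      exact hne1 (congrArg keyOf h)
    have hdisjW : PySem.Set.inter (pvCharset w1) (pvCharset w2) = [] := by
      rw [← pvKeyDisj]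
      rw [hk1, hk2]
      exact hdisjK
    have hval : e1.2 * e2.2 = PySem.Str.len w1 * PySem.Str.len w2 := by rw [hl1, hl2]
    rw [hval]
    rcases pvSublist_pair_of_ne hw1 hw2 hwne with hs | hs
    · refine (PySem.List.le_foldl_max _ 0).2 _ ?_
      simp only [List.mem_map, List.mem_filter, decide_eq_true_eq]
      exact ⟨(w1, w2), ⟨mem_pvPairs.mpr hs, hdisjW⟩, rfl⟩
    · rw [mul_comm]
      refine (PySem.List.le_foldl_max _ 0).2 _ ?_
      simp only [List.mem_map, List.mem_filter, decide_eq_true_eq]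
      exact ⟨(w2, w1), ⟨mem_pvPairs.mpr hs, pvInter_symm hdisjW⟩, rfl⟩

-- ===== VERDICT (by name: the statement is the Claim_ definition above) =====
theorem maxProduct_spec : Claim_equal_maxProduct := by
  intro words _
  unfold Spec_maxProduct
  rw [pvA_eq, pvB_eq, pvCore]
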